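-- pv_equiv track=rewrite | github.com/vgraeber/adventofcode | 2023/day16/part2.py | getbeamstartposs
-- ===== SOURCE A (Python) =====
-- def getbeamstartposs(origarr):
--   startdir = {"row": {'0': 'S', str(len(origarr) - 1): 'N'}, "col": {'0': 'E', str(len(origarr[0]) - 1): 'W'}}
--   startlocs = []
--   startdirs = []
--   for row in range(len(origarr)):
--     for col in range(len(origarr[row])):
--       if ((str(row) in startdir["row"]) and (str(col) in startdir["col"])):
--         startlocs.append([row, col])
--         startdirs.append(startdir["row"][str(row)])
--         startlocs.append([row, col])
--         startdirs.append(startdir["col"][str(col)])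
--       elif (str(row) in startdir["row"]):
--         startlocs.append([row, col])
--         startdirs.append(startdir["row"][str(row)])
--       elif (str(col) in startdir["col"]):
--         startlocs.append([row, col])
--         startdirs.append(startdir["col"][str(col)])
--   return startlocs, startdirs
-- ===== SOURCE B (Python) =====
-- def getbeamstartposs(origarr):
--   # Faster: visits only border cells (top/bottom rows plus boundary columns) instead of every cell.
--   h, w = len(origarr), len(origarr[0])
--   rowdir = {0: 'S', h - 1: 'N'}
--   coldir = {0: 'E', w - 1: 'W'}
--   locs = []
--   dirs = []
--   def visit(r, c):
--     if r in rowdir: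
--       locs.append([r, c])
--       dirs.append(rowdir[r])
--     if c in coldir:
--       locs.append([r, c])
--       dirs.append(coldir[c])
--   for r, line in enumerate(origarr):
--     if r in rowdir:
--       for c in range(len(line)):
--         visit(r, c)
--     else:
--       for c in coldir:
--         if 0 <= c < len(line):
--           visit(r, c)
--   return locs, dirs
-- ===== Notes on version B (the rewrite author's own statement) =====
-- stated objective: faster
-- what changed: B visits only the border cells (top/bottom rows fully, and for each middle row just the dict of boundary columns) with integer-keyed direction dicts, instead of A's scan of every grid cell with str()-keyed dict membership tests per cell; Pre_ excludes only the empty list, where A raises IndexError.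
-- outside the precondition, e.g. on getbeamstartposs([]): A raises IndexError, B raises IndexError
import Mathlib
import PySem

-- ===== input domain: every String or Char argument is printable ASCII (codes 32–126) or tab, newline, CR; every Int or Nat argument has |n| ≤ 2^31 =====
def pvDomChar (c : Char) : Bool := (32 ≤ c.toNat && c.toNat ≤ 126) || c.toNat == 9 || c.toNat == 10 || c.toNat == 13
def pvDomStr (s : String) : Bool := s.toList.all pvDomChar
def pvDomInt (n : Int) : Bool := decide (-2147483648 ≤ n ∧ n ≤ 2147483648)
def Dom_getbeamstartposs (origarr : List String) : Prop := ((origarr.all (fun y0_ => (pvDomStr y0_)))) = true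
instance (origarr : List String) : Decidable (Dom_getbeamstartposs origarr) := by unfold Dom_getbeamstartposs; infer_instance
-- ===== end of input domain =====

-- B visits only the border cells of the grid instead of scanning every cell; return value only, no mutation.

-- ===== PORT A =====
def getbeamstartposs (origarr : List String) : List (List Int) × List String :=
  let startdir : PySem.Dict String (PySem.Dict String String) :=
    (PySem.Dict.empty.insert "row"
        (((PySem.Dict.empty : PySem.Dict String String).insert "0" "S").insert
          (PySem.Int.toStr (PySem.List.len origarr - 1)) "N")).insert "col"
        (((PySem.Dict.empty : PySem.Dict String String).insert "0" "E").insert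
          (PySem.Int.toStr (PySem.Str.len ((PySem.List.pyGet? origarr 0).getD "") - 1)) "W")
  (PySem.List.pyRange 0 (PySem.List.len origarr) 1).foldl (fun st row =>
    (PySem.List.pyRange 0 (PySem.Str.len (PySem.List.pyGetD origarr row "")) 1).foldl (fun st col =>
      if ((startdir.getD "row" PySem.Dict.empty).contains (PySem.Int.toStr row)
          && (startdir.getD "col" PySem.Dict.empty).contains (PySem.Int.toStr col)) then
        (st.1 ++ [[row, col]] ++ [[row, col]],
         st.2 ++ [((startdir.getD "row" PySem.Dict.empty).get? (PySem.Int.toStr row)).getD ""]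
              ++ [((startdir.getD "col" PySem.Dict.empty).get? (PySem.Int.toStr col)).getD ""])
      else if (startdir.getD "row" PySem.Dict.empty).contains (PySem.Int.toStr row) then
        (st.1 ++ [[row, col]],
         st.2 ++ [((startdir.getD "row" PySem.Dict.empty).get? (PySem.Int.toStr row)).getD ""])
      else if (startdir.getD "col" PySem.Dict.empty).contains (PySem.Int.toStr col) then
        (st.1 ++ [[row, col]],
         st.2 ++ [((startdir.getD "col" PySem.Dict.empty).get? (PySem.Int.toStr col)).getD ""])
      else st) st) ([], [])

-- ===== PORT B =====
def pvVisit (rowdir coldir : PySem.Dict Int String)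
    (st : List (List Int) × List String) (r c : Int) : List (List Int) × List String :=
  let st1 := if rowdir.contains r then (st.1 ++ [[r, c]], st.2 ++ [(rowdir.get? r).getD ""]) else st
  if coldir.contains c then (st1.1 ++ [[r, c]], st1.2 ++ [(coldir.get? c).getD ""]) else st1

def getbeamstartposs_alt (origarr : List String) : List (List Int) × List String :=
  let h : Int := PySem.List.len origarr
  let w : Int := PySem.Str.len ((PySem.List.pyGet? origarr 0).getD "")
  let rowdir : PySem.Dict Int String :=
    ((PySem.Dict.empty : PySem.Dict Int String).insert 0 "S").insert (h - 1) "N"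
  let coldir : PySem.Dict Int String :=
    ((PySem.Dict.empty : PySem.Dict Int String).insert 0 "E").insert (w - 1) "W"
  (PySem.List.enumerate origarr).foldl (fun st rl =>
    if rowdir.contains rl.1 then
      (PySem.List.pyRange 0 (PySem.Str.len rl.2) 1).foldl
        (fun st c => pvVisit rowdir coldir st rl.1 c) st
    else
      coldir.keys.foldl
        (fun st c =>
          if 0 ≤ c ∧ c < PySem.Str.len rl.2 then pvVisit rowdir coldir st rl.1 c else st) st)
    ([], [])

-- ===== PRECONDITION & SPEC =====
-- Pre_ excludes only the empty list, on which Python A raises IndexError at origarr[0].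
def Pre_getbeamstartposs (origarr : List String) : Prop := origarr ≠ []
instance (origarr : List String) : Decidable (Pre_getbeamstartposs origarr) := by unfold Pre_getbeamstartposs; infer_instance
def pvWitness_getbeamstartposs : List String := ["..", ".."]

def Spec_getbeamstartposs (origarr : List String) (out : List (List Int) × List String) : Prop := out = getbeamstartposs_alt origarr
instance (origarr : List String) (out : List (List Int) × List String) : Decidable (Spec_getbeamstartposs origarr out) := by unfold Spec_getbeamstartposs; infer_instance

-- ===== CLAIM (what is proved, stated in full; the proofs are below) =====
def Claim_equal_getbeamstartposs : Prop := ∀ (origarr : List String), Dom_getbeamstartposs origarr → Pre_getbeamstartposs origarr → Spec_getbeamstartposs origarr (getbeamstartposs origarr)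

-- ===== LEMMAS AND PROOFS =====

def pvD (n : Nat) : List Char :=
  if _h : n < 10 then [Nat.digitChar n] else pvD (n / 10) ++ [Nat.digitChar (n % 10)]
decreasing_by exact Nat.div_lt_self (by omega) (by omega)

lemma pvAcc : ∀ (f n : Nat) (l : List Char), Nat.toDigitsCore 10 f n l = Nat.toDigitsCore 10 f n [] ++ l := by
  intro f
  induction f with
  | zero => intro n l; simp [Nat.toDigitsCore]
  | succ f ih =>
    intro n l
    simp only [Nat.toDigitsCore]
    by_cases h : n / 10 = 0
    · simp [h]
    · simp only [h]
      rw [ih (n / 10) (Nat.digitChar (n % 10) :: l), ih (n / 10) [Nat.digitChar (n % 10)]]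
      simp

lemma pvToDigits_eq : ∀ (f n : Nat), n < f → Nat.toDigitsCore 10 f n [] = pvD n := by
  intro f
  induction f with
  | zero => omega
  | succ f ih =>
    intro n hn
    simp only [Nat.toDigitsCore]
    by_cases h : n / 10 = 0
    · have h10 : n < 10 := by omega
      rw [pvD]
      simp [h, h10, Nat.mod_eq_of_lt h10]
    · have h10 : ¬ n < 10 := by omega
      rw [if_neg h, pvAcc, ih (n / 10) (by omega)]
      conv_rhs => rw [pvD]
      simp [h10]

lemma pvToDigits (n : Nat) : Nat.toDigits 10 n = pvD n :=
  pvToDigits_eq (n + 1) n (by omega)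

def pvVal (l : List Char) : Nat := l.foldl (fun a c => a * 10 + (c.toNat - 48)) 0

lemma pvVal_pvD : ∀ n, pvVal (pvD n) = n := by
  intro n
  induction n using pvD.induct with
  | case1 n h =>
    rw [pvD]; simp only [h, dif_pos]
    have : (Nat.digitChar n).toNat = n + 48 := by interval_cases n <;> decide
    simp [pvVal, this]
  | case2 n h ih =>
    rw [pvD]; simp only [h]
    have hm : n % 10 < 10 := by omega
    have : (Nat.digitChar (n % 10)).toNat = n % 10 + 48 := by interval_cases hh : (n % 10) <;> decide
    simp only [pvVal] at *
    simp [this, ih]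
    omega

lemma pvD_ne_neg : ∀ n c, c ∈ pvD n → c ≠ '-' := by
  intro n
  induction n using pvD.induct with
  | case1 n h =>
    intro c hc
    rw [pvD] at hc; simp only [h, dif_pos, List.mem_singleton] at hc
    subst hc; interval_cases n <;> decide
  | case2 n h ih =>
    intro c hc
    rw [pvD] at hc; simp [h] at hc
    rcases hc with hc | hc
    · exact ih c hc
    · subst hc
      have hm : n % 10 < 10 := by omega
      interval_cases hh : (n % 10) <;> decide

lemma pvToStr_inj (a b : Int) (ha : 0 ≤ a) : PySem.Int.toStr a = PySem.Int.toStr b ↔ a = b := by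
  constructor
  · intro hEq
    have h2 : PySem.Int.toChars a = PySem.Int.toChars b := by
      rw [← PySem.Int.toList_toStr, ← PySem.Int.toList_toStr, hEq]
    unfold PySem.Int.toChars at h2
    rw [if_neg (by omega)] at h2
    by_cases hb : b < 0
    · rw [if_pos hb, pvToDigits] at h2
      exact absurd rfl (pvD_ne_neg a.toNat '-' (h2 ▸ List.mem_cons_self ..))
    · rw [if_neg hb, pvToDigits, pvToDigits] at h2
      have := congrArg pvVal h2
      rw [pvVal_pvD, pvVal_pvD] at this
      omega
  · rintro rfl; rfl

lemma pvFoldlPair {α β γ : Type} (f : α → List β × List γ) (xs : List α) (s : List β × List γ) :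
    xs.foldl (fun s x => (s.1 ++ (f x).1, s.2 ++ (f x).2)) s
      = (s.1 ++ xs.flatMap (fun x => (f x).1), s.2 ++ xs.flatMap (fun x => (f x).2)) := by
  induction xs generalizing s with
  | nil => simp
  | cons x xs ih => simp [ih]

lemma pvFlatMapFilter {α β : Type} (xs : List α) (p : α → Bool) (f : α → List β)
    (h : ∀ x ∈ xs, p x = false → f x = []) : xs.flatMap f = (xs.filter p).flatMap f := by
  induction xs with
  | nil => rfl
  | cons x xs ih =>
    rw [List.flatMap_cons, List.filter_cons]
    by_cases hp : p x
    · simp only [hp, if_pos, List.flatMap_cons]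
      rw [ih (fun y hy => h y (List.mem_cons_of_mem x hy))]
    · simp only [Bool.not_eq_true] at hp
      rw [h x List.mem_cons_self hp, if_neg (by simp [hp])]
      simp only [List.nil_append]
      exact ih (fun y hy => h y (List.mem_cons_of_mem x hy))

lemma pvFilterEq (v : Int) : ∀ (k : Nat) (a b : Int), (b - a).toNat = k →
    (PySem.List.pyRange a b 1).filter (fun c => decide (c = v))
      = if a ≤ v ∧ v < b then [v] else [] := by
  intro k
  induction k with
  | zero =>
    intro a b hk
    rw [PySem.List.pyRange_one_eq_nil (by omega)]
    rw [if_neg (by omega)]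
    rfl
  | succ k ih =>
    intro a b hk
    rw [PySem.List.pyRange_one_cons (by omega), List.filter_cons]
    rw [ih (a + 1) b (by omega)]
    by_cases hav : a = v
    · subst hav
      rw [if_pos (show (decide (a = a)) = true by simp)]
      rw [if_neg (show ¬(a + 1 ≤ a ∧ a < b) by omega)]
      rw [if_pos (show a ≤ a ∧ a < b by omega)]
    · rw [if_neg (show ¬((decide (a = v)) = true) by simp [hav])]
      by_cases h2 : a ≤ v ∧ v < b
      · rw [if_pos (show a + 1 ≤ v ∧ v < b by omega), if_pos h2]
      · rw [if_neg (show ¬(a + 1 ≤ v ∧ v < b) by omega), if_neg h2]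

def pvCell (h w r c : Int) : List (List Int) × List String :=
  ((if r = 0 ∨ r = h - 1 then [[r, c]] else []) ++ (if c = 0 ∨ c = w - 1 then [[r, c]] else []),
   (if r = 0 ∨ r = h - 1 then [if r = h - 1 then "N" else "S"] else [])
     ++ (if c = 0 ∨ c = w - 1 then [if c = w - 1 then "W" else "E"] else []))

def pvD2 (m : Int) (s1 s2 : String) : PySem.Dict String String :=
  ((PySem.Dict.empty : PySem.Dict String String).insert "0" s1).insert (PySem.Int.toStr m) s2

lemma pvContains2 (m r : Int) (s1 s2 : String) (hr : 0 ≤ r) :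
    (pvD2 m s1 s2).contains (PySem.Int.toStr r) = decide (r = 0 ∨ r = m) := by
  rw [PySem.Dict.contains_eq_isSome_get?]
  unfold pvD2
  by_cases hm : r = m
  · subst hm
    rw [PySem.Dict.get?_insert_self]
    simp
  · rw [PySem.Dict.get?_insert_of_ne _ _ (fun he => hm ((pvToStr_inj r m hr).1 he))]
    by_cases h0 : r = 0
    · subst h0
      rw [show PySem.Int.toStr 0 = "0" from by decide, PySem.Dict.get?_insert_self]
      simp
    · rw [PySem.Dict.get?_insert_of_ne _ _
        (fun he => h0 ((pvToStr_inj r 0 hr).1 (by rw [he]; decide)))]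
      rw [PySem.Dict.get?_empty]
      simp [h0, hm]

lemma pvGet2 (m r : Int) (s1 s2 : String) (hr : 0 ≤ r) (hm : r = 0 ∨ r = m) :
    ((pvD2 m s1 s2).get? (PySem.Int.toStr r)).getD "" = if r = m then s2 else s1 := by
  unfold pvD2
  by_cases hrm : r = m
  · subst hrm; rw [PySem.Dict.get?_insert_self]; simp
  · have h0 : r = 0 := by tauto
    subst h0
    rw [PySem.Dict.get?_insert_of_ne _ _ (fun he => hrm ((pvToStr_inj 0 m hr).1 he))]
    rw [show PySem.Int.toStr 0 = "0" from by decide, PySem.Dict.get?_insert_self]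
    simp [hrm]

def pvDictA (h w : Int) : PySem.Dict String (PySem.Dict String String) :=
  (PySem.Dict.empty.insert "row" (pvD2 (h - 1) "S" "N")).insert "col" (pvD2 (w - 1) "E" "W")

lemma pvDictA_row (h w : Int) :
    (pvDictA h w).getD "row" PySem.Dict.empty = pvD2 (h - 1) "S" "N" := by
  unfold pvDictA PySem.Dict.getD
  rw [PySem.Dict.get?_insert_of_ne _ _ (by decide), PySem.Dict.get?_insert_self]
  rfl

lemma pvDictA_col (h w : Int) :
    (pvDictA h w).getD "col" PySem.Dict.empty = pvD2 (w - 1) "E" "W" := by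
  unfold pvDictA PySem.Dict.getD
  rw [PySem.Dict.get?_insert_self]
  rfl

lemma pvStepA (h w r c : Int) (hr : 0 ≤ r) (hc : 0 ≤ c) (st : List (List Int) × List String) :
    (if ((pvDictA h w).getD "row" PySem.Dict.empty).contains (PySem.Int.toStr r)
        && ((pvDictA h w).getD "col" PySem.Dict.empty).contains (PySem.Int.toStr c) then
       (st.1 ++ [[r, c]] ++ [[r, c]],
        st.2 ++ [(((pvDictA h w).getD "row" PySem.Dict.empty).get? (PySem.Int.toStr r)).getD ""]
             ++ [(((pvDictA h w).getD "col" PySem.Dict.empty).get? (PySem.Int.toStr c)).getD ""])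
     else if ((pvDictA h w).getD "row" PySem.Dict.empty).contains (PySem.Int.toStr r) then
       (st.1 ++ [[r, c]],
        st.2 ++ [(((pvDictA h w).getD "row" PySem.Dict.empty).get? (PySem.Int.toStr r)).getD ""])
     else if ((pvDictA h w).getD "col" PySem.Dict.empty).contains (PySem.Int.toStr c) then
       (st.1 ++ [[r, c]],
        st.2 ++ [(((pvDictA h w).getD "col" PySem.Dict.empty).get? (PySem.Int.toStr c)).getD ""])
     else st)
    = (st.1 ++ (pvCell h w r c).1, st.2 ++ (pvCell h w r c).2) := by
  rw [pvDictA_row, pvDictA_col, pvContains2 _ _ _ _ hr, pvContains2 _ _ _ _ hc]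
  unfold pvCell
  by_cases hR : r = 0 ∨ r = h - 1
  · by_cases hC : c = 0 ∨ c = w - 1
    · rw [if_pos (by simp [hR, hC])]
      rw [pvGet2 _ _ _ _ hr hR, pvGet2 _ _ _ _ hc hC]
      simp [hR, hC]
    · rw [if_neg (by simp [hC]), if_pos (by simp [hR])]
      rw [pvGet2 _ _ _ _ hr hR]
      simp [hR, hC]
  · by_cases hC : c = 0 ∨ c = w - 1
    · rw [if_neg (by simp [hR]), if_neg (by simp [hR]), if_pos (by simp [hC])]
      rw [pvGet2 _ _ _ _ hc hC]
      simp [hR, hC]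
    · rw [if_neg (by simp [hR]), if_neg (by simp [hR]), if_neg (by simp [hC])]
      simp [hR, hC]

def pvD2I (v1 : String) (m : Int) (v2 : String) : PySem.Dict Int String :=
  ((PySem.Dict.empty : PySem.Dict Int String).insert 0 v1).insert m v2

lemma pvContains2I (v1 : String) (m : Int) (v2 : String) (r : Int) :
    (pvD2I v1 m v2).contains r = decide (r = 0 ∨ r = m) := by
  unfold pvD2I
  rw [PySem.Dict.contains_eq_isSome_get?]
  by_cases hm : r = m
  · subst hm; rw [PySem.Dict.get?_insert_self]; simp
  · rw [PySem.Dict.get?_insert_of_ne _ _ hm]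
    by_cases h0 : r = 0
    · subst h0; rw [PySem.Dict.get?_insert_self]; simp
    · rw [PySem.Dict.get?_insert_of_ne _ _ h0, PySem.Dict.get?_empty]
      simp [h0, hm]

lemma pvGet2I (v1 : String) (m : Int) (v2 : String) (r : Int) (hm : r = 0 ∨ r = m) :
    ((pvD2I v1 m v2).get? r).getD "" = if r = m then v2 else v1 := by
  unfold pvD2I
  by_cases hrm : r = m
  · subst hrm; rw [PySem.Dict.get?_insert_self]; simp
  · have h0 : r = 0 := by tauto
    subst h0
    rw [PySem.Dict.get?_insert_of_ne _ _ hrm, PySem.Dict.get?_insert_self]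
    simp [hrm]

lemma pvStepB (h w r c : Int) (st : List (List Int) × List String) :
    pvVisit (pvD2I "S" (h - 1) "N") (pvD2I "E" (w - 1) "W") st r c
    = (st.1 ++ (pvCell h w r c).1, st.2 ++ (pvCell h w r c).2) := by
  unfold pvVisit pvCell
  rw [pvContains2I, pvContains2I]
  by_cases hR : r = 0 ∨ r = h - 1 <;> by_cases hC : c = 0 ∨ c = w - 1
  · have gR := pvGet2I "S" (h - 1) "N" r hR
    have gC := pvGet2I "E" (w - 1) "W" c hC
    simp [hR, hC, gR, gC]
  · have gR := pvGet2I "S" (h - 1) "N" r hR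
    simp [hR, hC, gR]
  · have gC := pvGet2I "E" (w - 1) "W" c hC
    simp [hR, hC, gC]
  · simp [hR, hC]

lemma pvFilterEq' (v : Int) (a b : Int) :
    (PySem.List.pyRange a b 1).filter (fun c => decide (c = v))
      = if a ≤ v ∧ v < b then [v] else [] :=
  pvFilterEq v (b - a).toNat a b rfl

lemma pvKeys2I (v1 : String) (m : Int) (v2 : String) :
    (pvD2I v1 m v2).keys = if m = 0 then [0] else [0, m] := by
  unfold pvD2I
  by_cases hm : m = 0
  · subst hm
    rw [if_pos rfl, PySem.Dict.keys_insert_of_contains]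
    · rfl
    · rfl
  · rw [if_neg hm, PySem.Dict.keys_insert_of_not_contains]
    · rfl
    · rw [PySem.Dict.contains_eq_isSome_get?, PySem.Dict.get?_insert_of_ne _ _ hm,
        PySem.Dict.get?_empty]
      rfl

lemma pvMid (w n : Int) :
    (pvD2I "E" (w - 1) "W").keys.filter (fun c => decide (0 ≤ c ∧ c < n))
      = (PySem.List.pyRange 0 n 1).filter (fun c => decide (c = 0 ∨ c = w - 1)) := by
  rw [pvKeys2I]
  by_cases hn : n ≤ 0
  · rw [PySem.List.pyRange_one_eq_nil hn]
    by_cases hw0 : w - 1 = 0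
    · rw [if_pos hw0]
      simp only [List.filter_cons, List.filter_nil]
      rw [if_neg (by simp; omega)]
    · rw [if_neg hw0]
      simp only [List.filter_cons, List.filter_nil]
      rw [if_neg (by simp; omega), if_neg (by simp; omega)]
  · rw [not_le] at hn
    by_cases hw0 : w - 1 = 0
    · rw [if_pos hw0, hw0]
      simp only [List.filter_cons, List.filter_nil]
      rw [if_pos (by simp; omega)]
      rw [List.filter_congr (l := PySem.List.pyRange 0 n 1)
            (fun x hx => show (decide (x = 0 ∨ x = 0)) = decide (x = 0) by simp)]
      rw [pvFilterEq' 0 0 n, if_pos ⟨le_refl 0, hn⟩]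
    · rw [if_neg hw0]
      by_cases hw : w - 1 < 0
      · simp only [List.filter_cons, List.filter_nil]
        rw [if_pos (by simp; omega), if_neg (by simp; omega)]
        rw [List.filter_congr (fun x hx => show (decide (x = 0 ∨ x = w - 1)) = decide (x = 0) by
              have := PySem.List.mem_pyRange_one.1 hx; simp; omega)]
        rw [pvFilterEq' 0 0 n, if_pos ⟨le_refl 0, hn⟩]
      · have hwpos : 0 < w - 1 := by omega
        simp only [List.filter_cons, List.filter_nil]
        rw [if_pos (by simp; omega)]
        rw [PySem.List.pyRange_one_cons hn, List.filter_cons,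
            if_pos (show (decide ((0:Int) = 0 ∨ (0:Int) = w - 1)) = true by simp)]
        rw [List.filter_congr (fun x hx => show (decide (x = 0 ∨ x = w - 1)) = decide (x = w - 1) by
              have := PySem.List.mem_pyRange_one.1 hx; simp; omega)]
        rw [pvFilterEq' (w - 1) (0 + 1) n]
        by_cases hwn : w - 1 < n
        · rw [if_pos (by simp; omega), if_pos ⟨by omega, hwn⟩]
        · rw [if_neg (by simp; omega), if_neg (by omega)]

def pvW (origarr : List String) : Int := PySem.Str.len ((PySem.List.pyGet? origarr 0).getD "")

def pvRowPair (h w n r : Int) : List (List Int) × List String :=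
  ((PySem.List.pyRange 0 n 1).flatMap (fun c => (pvCell h w r c).1),
   (PySem.List.pyRange 0 n 1).flatMap (fun c => (pvCell h w r c).2))

lemma pvA_eq (origarr : List String) :
    getbeamstartposs origarr
      = ((PySem.List.pyRange 0 (PySem.List.len origarr) 1).flatMap
           (fun r => (pvRowPair (PySem.List.len origarr) (pvW origarr)
              (PySem.Str.len (PySem.List.pyGetD origarr r "")) r).1),
         (PySem.List.pyRange 0 (PySem.List.len origarr) 1).flatMap
           (fun r => (pvRowPair (PySem.List.len origarr) (pvW origarr)
              (PySem.Str.len (PySem.List.pyGetD origarr r "")) r).2)) := by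
  simp only [getbeamstartposs]
  refine Eq.trans (PySem.List.foldl_congr_mem _ _
    (fun (st : List (List Int) × List String) r =>
      (st.1 ++ (pvRowPair (PySem.List.len origarr) (pvW origarr)
          (PySem.Str.len (PySem.List.pyGetD origarr r "")) r).1,
       st.2 ++ (pvRowPair (PySem.List.len origarr) (pvW origarr)
          (PySem.Str.len (PySem.List.pyGetD origarr r "")) r).2)) _ ?_) ?_
  · intro st row hrow
    dsimp only
    refine Eq.trans (PySem.List.foldl_congr_mem _ _
      (fun (st : List (List Int) × List String) c =>
        (st.1 ++ (pvCell (PySem.List.len origarr) (pvW origarr) row c).1,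
         st.2 ++ (pvCell (PySem.List.len origarr) (pvW origarr) row c).2)) _ ?_) ?_
    · intro st' col hcol
      exact pvStepA (PySem.List.len origarr) (pvW origarr) row col
        (PySem.List.mem_pyRange_one.1 hrow).1 (PySem.List.mem_pyRange_one.1 hcol).1 st'
    · rw [pvFoldlPair (fun c => pvCell (PySem.List.len origarr) (pvW origarr) row c)]
      rfl
  · rw [pvFoldlPair (fun r => pvRowPair (PySem.List.len origarr) (pvW origarr)
        (PySem.Str.len (PySem.List.pyGetD origarr r "")) r)]
    simp

lemma pvB_eq (origarr : List String) :
    getbeamstartposs_alt origarr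
      = ((PySem.List.pyRange 0 (PySem.List.len origarr) 1).flatMap
           (fun r => (pvRowPair (PySem.List.len origarr) (pvW origarr)
              (PySem.Str.len (PySem.List.pyGetD origarr r "")) r).1),
         (PySem.List.pyRange 0 (PySem.List.len origarr) 1).flatMap
           (fun r => (pvRowPair (PySem.List.len origarr) (pvW origarr)
              (PySem.Str.len (PySem.List.pyGetD origarr r "")) r).2)) := by
  simp only [getbeamstartposs_alt]
  rw [PySem.List.enumerate_eq_map_pyRange origarr "", List.foldl_map]
  refine Eq.trans (PySem.List.foldl_congr_mem _ _
    (fun (st : List (List Int) × List String) r =>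
      (st.1 ++ (pvRowPair (PySem.List.len origarr) (pvW origarr)
          (PySem.Str.len (PySem.List.pyGetD origarr r "")) r).1,
       st.2 ++ (pvRowPair (PySem.List.len origarr) (pvW origarr)
          (PySem.Str.len (PySem.List.pyGetD origarr r "")) r).2)) _ ?_) ?_
  · intro st row hrow
    dsimp only
    rw [show ((PySem.Dict.empty : PySem.Dict Int String).insert 0 "S").insert
          (PySem.List.len origarr - 1) "N" = pvD2I "S" (PySem.List.len origarr - 1) "N" from rfl,
        show ((PySem.Dict.empty : PySem.Dict Int String).insert 0 "E").insert
          (PySem.Str.len ((PySem.List.pyGet? origarr 0).getD "") - 1) "W"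
            = pvD2I "E" (pvW origarr - 1) "W" from rfl]
    rw [pvContains2I]
    by_cases hb : row = 0 ∨ row = PySem.List.len origarr - 1
    · rw [if_pos (by simp only [PySem.List.len_eq] at hb; simp [hb])]
      refine Eq.trans (PySem.List.foldl_congr_mem _ _
        (fun (st : List (List Int) × List String) c =>
          (st.1 ++ (pvCell (PySem.List.len origarr) (pvW origarr) row c).1,
           st.2 ++ (pvCell (PySem.List.len origarr) (pvW origarr) row c).2)) _ ?_) ?_
      · intro st' c _
        exact pvStepB (PySem.List.len origarr) (pvW origarr) row c st'
      · rw [pvFoldlPair (fun c => pvCell (PySem.List.len origarr) (pvW origarr) row c)]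
        rfl
    · rw [if_neg (by simp only [PySem.List.len_eq] at hb; simp [not_or.1 hb])]
      rw [PySem.List.foldl_ite_eq_foldl_filter]
      refine Eq.trans (PySem.List.foldl_congr_mem _ _
        (fun (st : List (List Int) × List String) c =>
          (st.1 ++ (pvCell (PySem.List.len origarr) (pvW origarr) row c).1,
           st.2 ++ (pvCell (PySem.List.len origarr) (pvW origarr) row c).2)) _ ?_) ?_
      · intro st' c _
        exact pvStepB (PySem.List.len origarr) (pvW origarr) row c st'
      · rw [pvFoldlPair (fun c => pvCell (PySem.List.len origarr) (pvW origarr) row c)]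
        rw [pvMid (pvW origarr) (PySem.Str.len (PySem.List.pyGetD origarr row ""))]
        rw [← pvFlatMapFilter _ _ (fun c => (pvCell (PySem.List.len origarr) (pvW origarr) row c).1)
            (fun c _ hpc => by
              simp only [decide_eq_false_iff_not] at hpc
              simp only [PySem.List.len_eq] at hb
              simp [pvCell, hb, hpc])]
        rw [← pvFlatMapFilter _ _ (fun c => (pvCell (PySem.List.len origarr) (pvW origarr) row c).2)
            (fun c _ hpc => by
              simp only [decide_eq_false_iff_not] at hpc
              simp only [PySem.List.len_eq] at hb
              simp [pvCell, hb, hpc])]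
        rfl
  · rw [pvFoldlPair (fun r => pvRowPair (PySem.List.len origarr) (pvW origarr)
        (PySem.Str.len (PySem.List.pyGetD origarr r "")) r)]
    simp

-- ===== VERDICT (by name: the statement is the Claim_ definition above) =====
theorem getbeamstartposs_spec : Claim_equal_getbeamstartposs := by
  intro origarr _ _
  unfold Spec_getbeamstartposs
  rw [pvA_eq, pvB_eq]
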